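-- pv_equiv track=rewrite | github.com/RTimothyEdwards/open_pdks | common/cdl2spi.py | mapDiscard
-- ===== SOURCE A (Python) =====
-- def mapDiscard(tok):
--     tlen = len(tok)
--     assign=[]
--     directive=[]
--     for i in range(len(tok)-1, 0, -1):
--         if not tok[i].startswith("$"):
--             continue
--         if "=" in tok[i]:
--             assign += [ tok[i] ]
--             del tok[i]
--             continue
--         directive += [ tok[i] ]
--         del tok[i]
--     return [ assign, directive, tok ]
-- ===== SOURCE B (Python) =====
-- def mapDiscard(tok):
--     # Single forward pass; assign/directive reversed once at the end to match
--     # the original's backward collection order. Mutates tok in place like A.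
--     assign = []
--     directive = []
--     kept = tok[:1]
--     for t in tok[1:]:
--         if t.startswith("$"):
--             if "=" in t:
--                 assign.append(t)
--             else:
--                 directive.append(t)
--         else:
--             kept.append(t)
--     assign.reverse()
--     directive.reverse()
--     tok[:] = kept
--     return [assign, directive, tok]
-- ===== Notes on version B (the rewrite author's own statement) =====
-- stated objective: alternative
-- what changed: Replaces the backward index loop with in-place del by one forward pass that partitions tokens into three lists and reverses assign/directive once at the end; worst-case quadratic deletion cost disappears, measured time on the random inputs is comparable.
import Mathlib
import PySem

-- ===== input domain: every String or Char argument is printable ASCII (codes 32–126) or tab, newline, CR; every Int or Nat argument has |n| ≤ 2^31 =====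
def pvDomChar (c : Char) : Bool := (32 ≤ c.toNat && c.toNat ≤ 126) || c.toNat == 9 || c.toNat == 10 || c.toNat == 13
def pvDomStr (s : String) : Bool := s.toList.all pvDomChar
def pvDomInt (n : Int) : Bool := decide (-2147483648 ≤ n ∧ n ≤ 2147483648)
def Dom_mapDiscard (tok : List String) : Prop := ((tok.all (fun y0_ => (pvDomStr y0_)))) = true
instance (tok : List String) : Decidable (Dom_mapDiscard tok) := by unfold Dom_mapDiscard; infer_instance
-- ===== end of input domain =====

-- B replaces A's backward index loop with in-place deletion by one forward
-- partitioning pass plus a final reverse of assign/directive (alternative algorithm).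
-- Both A and B mutate their list argument in Python; the theorems here are about
-- the return value (the mutation is identical in both: tok becomes the kept list).

-- ===== PORT A =====
-- Backward loop 'for i in range(len(tok)-1, 0, -1)' as structural recursion on the
-- index; 'del tok[i]' is List.eraseIdx at the (always in-range, nonnegative) index.
def mapDiscardLoop : Nat → List String × List String × List String → List String × List String × List String
  | 0, st => st
  | (i+1), (assign, directive, tok) =>
    match PySem.List.pyGet? tok ((i+1 : Nat) : Int) with
    | none => mapDiscardLoop i (assign, directive, tok)   -- unreachable: the index is in range
    | some s =>
      if ¬ PySem.Str.startswith s "$" then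
        mapDiscardLoop i (assign, directive, tok)
      else if PySem.Str.isIn "=" s then
        mapDiscardLoop i (assign ++ [s], directive, tok.eraseIdx (i+1))
      else
        mapDiscardLoop i (assign, directive ++ [s], tok.eraseIdx (i+1))

def mapDiscard (tok : List String) : List (List String) :=
  let st := mapDiscardLoop (tok.length - 1) ([], [], tok)
  [st.1, st.2.1, st.2.2]

-- ===== PORT B =====
def mapDiscard_alt (tok : List String) : List (List String) :=
  let st := (tok.drop 1).foldl
    (fun (st : List String × List String × List String) t =>
      if PySem.Str.startswith t "$" then
        if PySem.Str.isIn "=" t then (st.1 ++ [t], st.2.1, st.2.2)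
        else (st.1, st.2.1 ++ [t], st.2.2)
      else (st.1, st.2.1, st.2.2 ++ [t]))
    ([], [], tok.take 1)
  [st.1.reverse, st.2.1.reverse, st.2.2]

-- ===== PRECONDITION & SPEC =====
def Spec_mapDiscard (tok : List String) (out : List (List String)) : Prop := out = mapDiscard_alt tok
instance (tok : List String) (out : List (List String)) : Decidable (Spec_mapDiscard tok out) := by unfold Spec_mapDiscard; infer_instance

-- ===== CLAIM (what is proved, stated in full; the proofs are below) =====
def Claim_equal_mapDiscard : Prop := ∀ (tok : List String), Dom_mapDiscard tok → Spec_mapDiscard tok (mapDiscard tok)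

-- ===== LEMMAS AND PROOFS =====

-- Indices ≤ i never touch an element appended past position i: it rides along inert.
theorem mapDiscardLoop_append_last (i : Nat) (a d ys : List String) (x : String)
    (h : i < ys.length) :
    mapDiscardLoop i (a, d, ys ++ [x]) =
      ((mapDiscardLoop i (a, d, ys)).1, (mapDiscardLoop i (a, d, ys)).2.1,
       (mapDiscardLoop i (a, d, ys)).2.2 ++ [x]) := by
  induction i generalizing a d ys with
  | zero => simp [mapDiscardLoop]
  | succ i ih =>
    have hget : PySem.List.pyGet? (ys ++ [x]) ((i+1 : Nat) : Int)
        = PySem.List.pyGet? ys ((i+1 : Nat) : Int) := by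
      rw [PySem.List.pyGet?_natCast, PySem.List.pyGet?_natCast,
        List.getElem?_append_left h]
    have herase : (ys ++ [x]).eraseIdx (i+1) = ys.eraseIdx (i+1) ++ [x] :=
      List.eraseIdx_append_of_lt_length h [x]
    simp only [mapDiscardLoop, hget]
    cases hg : PySem.List.pyGet? ys ((i+1 : Nat) : Int) with
    | none => exact ih a d ys (by omega)
    | some s =>
      by_cases hs : PySem.Str.startswith s "$"
      · by_cases he : PySem.Str.isIn "=" s
        · simp only [hs, he, not_true, if_false, if_true, herase]
          exact ih (a ++ [s]) d (ys.eraseIdx (i+1)) (by rw [List.length_eraseIdx_of_lt (by omega)]; omega)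
        · simp only [hs, he, not_true, if_false, herase]
          exact ih a (d ++ [s]) (ys.eraseIdx (i+1)) (by rw [List.length_eraseIdx_of_lt (by omega)]; omega)
      · simp only [hs]
        exact ih a d ys (by omega)

-- Characterisation of A's backward loop on h :: l.
theorem mapDiscardLoop_spec (l : List String) (h : String) (a d : List String) :
    mapDiscardLoop l.length (a, d, h :: l) =
      (a ++ (l.filter (fun s => PySem.Str.startswith s "$" && PySem.Str.isIn "=" s)).reverse,
       d ++ (l.filter (fun s => PySem.Str.startswith s "$" && !PySem.Str.isIn "=" s)).reverse,
       h :: l.filter (fun s => !PySem.Str.startswith s "$")) := by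
  induction l using List.reverseRecOn generalizing a d with
  | nil => simp [mapDiscardLoop]
  | append_singleton l x ih =>
    have hlen : (l ++ [x]).length = l.length + 1 := by simp
    have hget : PySem.List.pyGet? (h :: (l ++ [x])) ((l.length + 1 : Nat) : Int) = some x := by
      rw [PySem.List.pyGet?_natCast]
      simp
    have herase : (h :: (l ++ [x])).eraseIdx (l.length + 1) = h :: l := by
      rw [List.eraseIdx_cons_succ]
      simp [List.eraseIdx_append_of_length_le (le_refl l.length)]
    rw [hlen]
    simp only [mapDiscardLoop, hget]
    by_cases hs : PySem.Chars.startswith x.toList ['$']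
    · by_cases he : PySem.Chars.isIn ['='] x.toList
      · have hs0 : PySem.Str.startswith x "$" = true := by simpa using hs
        have he0 : PySem.Str.isIn "=" x = true := by simpa using he
        simp only [hs0, he0, not_true, if_false, if_true, herase, ih]
        simp [List.filter_append, hs, he, List.append_assoc]
      · have hs0 : PySem.Str.startswith x "$" = true := by simpa using hs
        have he0 : PySem.Str.isIn "=" x = false := by simpa using he
        simp only [hs0, he0, not_true, Bool.false_eq_true, if_false, herase, ih]
        simp [List.filter_append, hs, he, List.append_assoc]
    · have hs0 : PySem.Str.startswith x "$" = false := by simpa using hs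
      simp only [hs0, Bool.false_eq_true, not_false_iff, if_true]
      have hx : (h :: (l ++ [x])) = (h :: l) ++ [x] := by simp
      rw [hx, mapDiscardLoop_append_last l.length a d (h :: l) x (by simp), ih]
      simp [List.filter_append, hs]

-- Characterisation of B's forward fold.
theorem mapDiscardFold_spec (l : List String) (a d k : List String) :
    l.foldl
      (fun (st : List String × List String × List String) t =>
        if PySem.Str.startswith t "$" then
          if PySem.Str.isIn "=" t then (st.1 ++ [t], st.2.1, st.2.2)
          else (st.1, st.2.1 ++ [t], st.2.2)
        else (st.1, st.2.1, st.2.2 ++ [t])) (a, d, k) =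
      (a ++ l.filter (fun s => PySem.Str.startswith s "$" && PySem.Str.isIn "=" s),
       d ++ l.filter (fun s => PySem.Str.startswith s "$" && !PySem.Str.isIn "=" s),
       k ++ l.filter (fun s => !PySem.Str.startswith s "$")) := by
  induction l generalizing a d k with
  | nil => simp
  | cons t l ih =>
    rw [List.foldl_cons]
    by_cases hs : PySem.Str.startswith t "$"
    · by_cases he : PySem.Str.isIn "=" t
      · have hs' : PySem.Chars.startswith t.toList ['$'] = true := by simpa using hs
        have he' : PySem.Chars.isIn ['='] t.toList = true := by simpa using he
        rw [if_pos hs, if_pos he, ih]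
        simp [hs', he']
      · have hs' : PySem.Chars.startswith t.toList ['$'] = true := by simpa using hs
        have he' : PySem.Chars.isIn ['='] t.toList = false := by simpa using he
        rw [if_pos hs, if_neg he, ih]
        simp [hs', he']
    · have hs' : PySem.Chars.startswith t.toList ['$'] = false := by simpa using hs
      rw [if_neg hs, ih]
      simp [hs']

-- ===== VERDICT (by name: the statement is the Claim_ definition above) =====
theorem mapDiscard_spec : Claim_equal_mapDiscard := by
  intro tok _
  unfold Spec_mapDiscard
  cases tok with
  | nil => rfl
  | cons h l =>
    show mapDiscard (h :: l) = mapDiscard_alt (h :: l)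
    unfold mapDiscard mapDiscard_alt
    simp only [List.length_cons, Nat.add_sub_cancel, List.drop_succ_cons, List.drop_zero,
      List.take_succ_cons, List.take_zero]
    rw [mapDiscardLoop_spec, mapDiscardFold_spec]
    simp
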